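-- pv_equiv track=rewrite | github.com/p1x31/ctci-python | yandex/avito_2023/f.py | rename_files
-- ===== SOURCE A (Python) =====
-- def rename_files(events, filenames):
--
--     extension = ".jpg"
--     new_filenames = []
--
--     for filename in filenames:
--         if filename.startswith("DCIM"):
--             # DCIM-2023-04-30-1.jpg
--             parts = filename.split("-")
--             year = parts[1]
--             month = parts[2]
--             day = parts[3].split(".")[0]
--         elif filename.startswith("PXL"):
--             # PXL_20230430_092422111.jpg
--             parts = filename.split("_")
--             year = parts[1][:4]
--             month = parts[1][4:6]
--             day = parts[1][6:8]
--         else: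
--             # 202304300924-1.jpg
--             year = filename[:4]
--             month = filename[4:6]
--             day = filename[6:8]
--
--         event = events[(year, month, day)]
--         new_filename = f"{event}_{year}_{month}_{day}"
--         new_filenames.append(new_filename)
--
--     new_filenames.sort()
--
--     counter = {}
--     result = []
--     for new_filename in new_filenames:
--         if new_filename not in counter:
--             counter[new_filename] = 1
--         else:
--             counter[new_filename] += 1
--
--         new_imagename = f"{new_filename}_{str(counter[new_filename])}{extension}"
--         result.append(new_imagename)
--
--     return result
-- ===== SOURCE B (Python) =====
-- def _date_key(filename):
--     if filename.startswith("DCIM"):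
--         parts = filename.split("-")
--         return parts[1], parts[2], parts[3].split(".")[0]
--     elif filename.startswith("PXL"):
--         stamp = filename.split("_")[1]
--         return stamp[:4], stamp[4:6], stamp[6:8]
--     else:
--         return filename[:4], filename[4:6], filename[6:8]
--
--
-- def rename_files(events, filenames):
--     names = sorted(
--         "{}_{}_{}_{}".format(events[k], *k) for k in map(_date_key, filenames)
--     )
--     result = []
--     i = 0
--     n = len(names)
--     while i < n:
--         j = i
--         while j < n and names[j] == names[i]:
--             j += 1
--         result.extend("{}_{}.jpg".format(names[i], c) for c in range(1, j - i + 1))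
--         i = j
--     return result
-- ===== Notes on version B (the rewrite author's own statement) =====
-- stated objective: alternative
-- what changed: The numbering pass no longer maintains a counter dict over the whole list: since equal names are adjacent after sorting, B scans the sorted list with two pointers, finds each run of equal names, and emits name_1..name_k for the run directly.
import Mathlib
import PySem

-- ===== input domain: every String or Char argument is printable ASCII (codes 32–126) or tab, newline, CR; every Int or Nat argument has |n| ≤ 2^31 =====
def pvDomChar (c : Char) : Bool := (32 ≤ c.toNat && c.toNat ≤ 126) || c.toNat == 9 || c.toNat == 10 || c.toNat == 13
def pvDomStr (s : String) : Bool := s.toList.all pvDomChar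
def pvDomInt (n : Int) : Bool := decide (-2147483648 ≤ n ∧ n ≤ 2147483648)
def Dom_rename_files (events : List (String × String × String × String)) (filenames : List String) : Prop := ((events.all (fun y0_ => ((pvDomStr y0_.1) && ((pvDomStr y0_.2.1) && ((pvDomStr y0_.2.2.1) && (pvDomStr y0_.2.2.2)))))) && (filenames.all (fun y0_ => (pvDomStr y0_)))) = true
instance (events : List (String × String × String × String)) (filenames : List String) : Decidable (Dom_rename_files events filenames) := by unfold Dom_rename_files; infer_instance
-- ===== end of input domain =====

-- B replaces A's counter-dict numbering pass with a two-pointer grouping scan over the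
-- sorted list (equal names are adjacent after sorting), same return value (objective: alternative).

-- ===== PORT A =====
-- A's second loop: counter dict + result accumulator, one step per filename
def pvALoop (counter : PySem.Dict String Int) (result : List String) : List String → List String
  | [] => result
  | s :: rest =>
    -- if s not in counter: counter[s] = 1 else counter[s] += 1 ; then uses counter[s]
    let cnt : Int := match counter.get? s with | none => 1 | some v => v + 1
    pvALoop (counter.insert s cnt) (result ++ [s ++ "_" ++ PySem.Int.toStr cnt ++ ".jpg"]) rest

def rename_files (events : List (String × String × String × String)) (filenames : List String) : List String :=
  let new_filenames := filenames.foldl (fun acc filename =>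
    let ymd : String × String × String :=
      if PySem.Str.startswith filename "DCIM" then
        let parts := ((PySem.Str.split? filename "-").getD [])
        (((PySem.List.pyGet? parts 1).getD ""), ((PySem.List.pyGet? parts 2).getD ""),
          ((PySem.List.pyGet? ((PySem.Str.split? ((PySem.List.pyGet? parts 3).getD "") ".").getD []) 0).getD ""))
      else if PySem.Str.startswith filename "PXL" then
        let p1 := (PySem.List.pyGet? ((PySem.Str.split? filename "_").getD []) 1).getD ""
        (PySem.Str.slice p1 none (some 4), PySem.Str.slice p1 (some 4) (some 6),
          PySem.Str.slice p1 (some 6) (some 8))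
      else
        (PySem.Str.slice filename none (some 4), PySem.Str.slice filename (some 4) (some 6),
          PySem.Str.slice filename (some 6) (some 8))
    let event := ((events.find? (fun e => e.1 == ymd.1 && e.2.1 == ymd.2.1 && e.2.2.1 == ymd.2.2)).map (fun e => e.2.2.2)).getD ""
    acc ++ [event ++ "_" ++ ymd.1 ++ "_" ++ ymd.2.1 ++ "_" ++ ymd.2.2]) []
  pvALoop PySem.Dict.empty [] (PySem.List.sorted new_filenames (fun x => x) false)

-- ===== PORT B =====
def pvDateKey (filename : String) : String × String × String :=
  if PySem.Str.startswith filename "DCIM" then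
    let parts := ((PySem.Str.split? filename "-").getD [])
    (((PySem.List.pyGet? parts 1).getD ""), ((PySem.List.pyGet? parts 2).getD ""),
      ((PySem.List.pyGet? ((PySem.Str.split? ((PySem.List.pyGet? parts 3).getD "") ".").getD []) 0).getD ""))
  else if PySem.Str.startswith filename "PXL" then
    let stamp := (PySem.List.pyGet? ((PySem.Str.split? filename "_").getD []) 1).getD ""
    (PySem.Str.slice stamp none (some 4), PySem.Str.slice stamp (some 4) (some 6),
      PySem.Str.slice stamp (some 6) (some 8))
  else
    (PySem.Str.slice filename none (some 4), PySem.Str.slice filename (some 4) (some 6),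
      PySem.Str.slice filename (some 6) (some 8))

-- events[k]: first entry whose (year, month, day) matches
def pvEvGet : List (String × String × String × String) → String → String → String → String
  | [], _, _, _ => ""
  | e :: rest, y, m, d =>
    if e.1 == y && e.2.1 == m && e.2.2.1 == d then e.2.2.2 else pvEvGet rest y m d

-- two-pointer grouping scan over the sorted list: i..j is one run of equal names
def pvBGroup (names : List String) : List String :=
  match names with
  | [] => []
  | s :: rest =>
    let run := rest.takeWhile (fun x => x == s)
    (PySem.List.pyRange 1 ((run.length : Int) + 2) 1).map
        (fun c => s ++ "_" ++ PySem.Int.toStr c ++ ".jpg")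
      ++ pvBGroup (rest.dropWhile (fun x => x == s))
termination_by names.length
decreasing_by
  simp only [List.length_cons]
  exact Nat.lt_succ_of_le (List.length_dropWhile_le _ _)

def rename_files_alt (events : List (String × String × String × String)) (filenames : List String) : List String :=
  let names := PySem.List.sorted
    (filenames.map (fun f =>
      let k := pvDateKey f
      pvEvGet events k.1 k.2.1 k.2.2 ++ "_" ++ k.1 ++ "_" ++ k.2.1 ++ "_" ++ k.2.2))
    (fun x => x) false
  pvBGroup names

-- ===== PRECONDITION & SPEC =====
-- Pre_ excludes exactly the inputs where Python A raises: a "DCIM" filename with fewer than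
-- 4 '-'-parts or a "PXL" filename with fewer than 2 '_'-parts (IndexError), and a filename
-- whose parsed (year, month, day) key is absent from events (KeyError).
def Pre_rename_files (events : List (String × String × String × String)) (filenames : List String) : Prop :=
  (filenames.all (fun f =>
    (if PySem.Str.startswith f "DCIM" then decide ((((PySem.Str.split? f "-").getD [])).length ≥ 4)
     else if PySem.Str.startswith f "PXL" then decide ((((PySem.Str.split? f "_").getD [])).length ≥ 2)
     else true)
    && events.any (fun e => (e.1, e.2.1, e.2.2.1) == pvDateKey f))) = true
instance (events : List (String × String × String × String)) (filenames : List String) : Decidable (Pre_rename_files events filenames) := by unfold Pre_rename_files; infer_instance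

def pvWitness_rename_files : (List (String × String × String × String)) × List String :=
  ([("2023", "04", "30", "party")], ["DCIM-2023-04-30-1.jpg", "PXL_20230430_092422111.jpg"])

def Spec_rename_files (events : List (String × String × String × String)) (filenames : List String) (out : List String) : Prop := out = rename_files_alt events filenames
instance (events : List (String × String × String × String)) (filenames : List String) (out : List String) : Decidable (Spec_rename_files events filenames out) := by unfold Spec_rename_files; infer_instance

-- ===== CLAIM (what is proved, stated in full; the proofs are below) =====
def Claim_equal_rename_files : Prop := ∀ (events : List (String × String × String × String)) (filenames : List String), Dom_rename_files events filenames → Pre_rename_files events filenames → Spec_rename_files events filenames (rename_files events filenames)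

-- ===== LEMMAS AND PROOFS =====

theorem pvEvGet_eq_find? (events : List (String × String × String × String)) (y m d : String) :
    pvEvGet events y m d
      = ((events.find? (fun e => e.1 == y && e.2.1 == m && e.2.2.1 == d)).map (fun e => e.2.2.2)).getD "" := by
  induction events with
  | nil => rfl
  | cons e rest ih =>
    simp only [pvEvGet, List.find?_cons]
    by_cases h : (e.1 == y && e.2.1 == m && e.2.2.1 == d) = true
    · simp [h]
    · simp only [Bool.not_eq_true] at h
      simp [h, ih]

theorem pvRange_one_map (k : Nat) :
    PySem.List.pyRange 1 ((k : Int) + 1) 1 = (List.range k).map (fun (t : Nat) => ((t : Int) + 1)) := by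
  induction k with
  | zero => decide
  | succ k ih =>
    have h2 : (1 : Int) ≤ (k : Int) + 1 := by omega
    rw [show ((k+1 : Nat) : Int) + 1 = ((k : Int) + 1) + 1 by push_cast; ring,
        PySem.List.pyRange_one_succ_right h2, ih, List.range_succ]
    simp

theorem pvALoop_run (k : Nat) (s : String) (rest' : List String)
    (c : PySem.Dict String Int) (acc : List String) (n : Int)
    (h : (match c.get? s with | none => (1 : Int) | some v => v + 1) = n + 1) :
    pvALoop c acc (List.replicate (k + 1) s ++ rest')
      = pvALoop (c.insert s (n + k + 1))
          (acc ++ (List.range (k + 1)).map (fun (t : Nat) => s ++ "_" ++ PySem.Int.toStr (n + (t : Int) + 1) ++ ".jpg"))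
          rest' := by
  induction k generalizing c acc n with
  | zero =>
    simp only [List.replicate, List.cons_append, List.nil_append, pvALoop, h]
    norm_num [List.range_one]
  | succ k ih =>
    rw [show k + 1 + 1 = (k+1) + 1 from rfl, List.replicate_succ, List.cons_append]
    simp only [pvALoop, h]
    rw [ih (c.insert s (n+1)) _ (n+1) (by rw [PySem.Dict.get?_insert_self]),
        PySem.Dict.insert_insert_self]
    have harith : n + 1 + (k : Int) + 1 = n + ((k : Nat) + 1 : Nat) + 1 := by push_cast; ring
    rw [harith]
    congr 1
    rw [List.append_assoc]
    congr 1
    conv_rhs => rw [List.range_succ_eq_map]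
    simp only [List.map_cons, List.map_map, List.singleton_append, Nat.cast_zero]
    congr 1
    · norm_num
    · apply List.map_congr_left
      intro t _
      simp only [Function.comp_apply]
      have : n + 1 + (t : Int) + 1 = n + ((t : Int) + 1) + 1 := by ring
      rw [this]
      push_cast
      ring_nf

theorem pvBGroup_cons (s : String) (rest : List String) :
    pvBGroup (s :: rest)
      = (PySem.List.pyRange 1 (((rest.takeWhile (fun x => x == s)).length : Int) + 2) 1).map
            (fun c => s ++ "_" ++ PySem.Int.toStr c ++ ".jpg")
          ++ pvBGroup (rest.dropWhile (fun x => x == s)) := by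
  rw [pvBGroup.eq_def]

theorem pvALoop_eq_group (l : List String) (c : PySem.Dict String Int) (acc : List String)
    (hs : l.Pairwise (· ≤ ·)) (hc : ∀ x ∈ l, c.get? x = none) :
    pvALoop c acc l = acc ++ pvBGroup l := by
  induction hn : l.length using Nat.strong_induction_on generalizing l c acc with
  | _ N IH =>
  match l, hn with
  | [], _ => simp [pvALoop, pvBGroup]
  | s :: rest, hn =>
    have hget : c.get? s = none := hc s (by simp)
    have hrepl : rest.takeWhile (fun x => x == s)
        = List.replicate (rest.takeWhile (fun x => x == s)).length s := by
      apply List.eq_replicate_of_mem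
      intro b hb
      exact eq_of_beq (List.mem_takeWhile_imp (p := fun x => x == s) (l := rest) hb)
    have hdec : s :: rest
        = List.replicate ((rest.takeWhile (fun x => x == s)).length + 1) s
            ++ rest.dropWhile (fun x => x == s) := by
      rw [List.replicate_succ, List.cons_append, ← hrepl, List.takeWhile_append_dropWhile]
    have hsub : (rest.dropWhile (fun x => x == s)).Sublist rest := List.dropWhile_sublist _
    have hrest_pw : rest.Pairwise (· ≤ ·) := (List.pairwise_cons.mp hs).2
    have hrest'_pw : (rest.dropWhile (fun x => x == s)).Pairwise (· ≤ ·) := hrest_pw.sublist hsub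
    have hle : ∀ x ∈ rest, s ≤ x := (List.pairwise_cons.mp hs).1
    have hne : ∀ x ∈ rest.dropWhile (fun x => x == s), x ≠ s := by
      cases hh : rest.dropWhile (fun x => x == s) with
      | nil => intro x hx; simp at hx
      | cons h0 t =>
        have hh0 : (h0 == s) = false := by
          have hnil : rest.dropWhile (fun x => x == s) ≠ [] := by rw [hh]; simp
          have := List.head_dropWhile_not (fun x => x == s) hnil
          rwa [show (rest.dropWhile (fun x => x == s)).head hnil = h0 by simp [hh]] at this
        have hh0ne : h0 ≠ s := by simpa using hh0
        have hsh0 : s < h0 := lt_of_le_of_ne (hle h0 (hsub.mem (by rw [hh]; simp))) (Ne.symm hh0ne)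
        intro x hx
        rcases List.mem_cons.mp hx with rfl | hx
        · exact hh0ne
        · have hpw := hrest'_pw
          rw [hh] at hpw
          have h0x : h0 ≤ x := (List.pairwise_cons.mp hpw).1 x hx
          intro he
          rw [he] at h0x
          exact absurd (lt_of_lt_of_le hsh0 h0x) (lt_irrefl s)
    have hc' : ∀ x ∈ rest.dropWhile (fun x => x == s),
        (c.insert s (((rest.takeWhile (fun x => x == s)).length : Int) + 1)).get? x = none := by
      intro x hx
      rw [PySem.Dict.get?_insert_of_ne _ _ (hne x hx)]
      exact hc x (List.mem_cons_of_mem _ (hsub.mem hx))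
    have hlen : (rest.dropWhile (fun x => x == s)).length < N := by
      rw [← hn]
      simp only [List.length_cons]
      exact Nat.lt_succ_of_le (List.length_dropWhile_le _ _)
    have hmatch : (match c.get? s with | none => (1 : Int) | some v => v + 1) = 0 + 1 := by
      rw [hget]; norm_num
    rw [hdec, pvALoop_run _ s _ c acc 0 hmatch]
    simp only [zero_add]
    rw [IH _ hlen _ _ _ hrest'_pw hc' rfl]
    conv_rhs => rw [← hdec]
    rw [pvBGroup_cons, ← List.append_assoc]
    congr 2
    rw [show (((rest.takeWhile (fun x => x == s)).length : Int) + 2)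
          = (((rest.takeWhile (fun x => x == s)).length + 1 : Nat) : Int) + 1 by push_cast; ring,
        pvRange_one_map, List.map_map]
    simp [Function.comp]


-- ===== VERDICT (by name: the statement is the Claim_ definition above) =====
theorem rename_files_spec : Claim_equal_rename_files := by
  intro events filenames _ _
  unfold Spec_rename_files rename_files rename_files_alt
  rw [PySem.List.foldl_append_singleton_eq_map, List.nil_append]
  rw [pvALoop_eq_group _ _ _ (PySem.List.sorted_pairwise _ _)
        (fun x _ => PySem.Dict.get?_empty x), List.nil_append]
  congr 2
  apply List.map_congr_left
  intro f _
  simp only [pvDateKey, pvEvGet_eq_find?]
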